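-- pv_equiv track=rewrite | github.com/GayanRuchiranga/ChemGuide | Chem_Guide_BackEnd/identify_molecule.py | alcohol
-- ===== SOURCE A (Python) =====
-- def alcohol(input):
--     carbon = 0
--     hydrogen = 0
--     oxygen = 0
--     alcohol_val = 0
--     for i in input:
--         if i == "C" or i == "c":
--             carbon += 1
--         elif i == "H" or i == "h":
--             hydrogen += 1
--         elif i == "O" or i == "o":
--             oxygen += 1
--         elif i.isdigit():
--             hydrogen += int(i)-1
--         else:
--             alcohol_val = 1
--
--     if alcohol_val != 1 and hydrogen == ((carbon * 2)+2) and oxygen == 1: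
--         # return 0 if it is an alcohol
--         return "0"
--     else:
--         # return 1 if it is not an alcohol
--         return "1"
-- ===== SOURCE B (Python) =====
-- def alcohol(input):
--     valid = set("CcHhOo0123456789")
--     if any(ch not in valid for ch in input):
--         # return 1 if it is not an alcohol
--         return "1"
--     carbon = input.count("C") + input.count("c")
--     oxygen = input.count("O") + input.count("o")
--     hydrogen = input.count("H") + input.count("h") + sum(
--         (int(d) - 1) * input.count(d) for d in "0123456789")
--     # return 0 if it is an alcohol
--     return "0" if hydrogen == carbon * 2 + 2 and oxygen == 1 else "1"
-- ===== Notes on version B (the rewrite author's own statement) =====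
-- stated objective: idiomatic
-- what changed: Replaces A's single accumulating state-machine loop (four running counters updated per character) by per-character tallies: one validity scan plus str.count for each relevant character, with the hydrogen digit contribution derived from a digit table; the element counters and the running alcohol_val flag disappear.
import Mathlib
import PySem

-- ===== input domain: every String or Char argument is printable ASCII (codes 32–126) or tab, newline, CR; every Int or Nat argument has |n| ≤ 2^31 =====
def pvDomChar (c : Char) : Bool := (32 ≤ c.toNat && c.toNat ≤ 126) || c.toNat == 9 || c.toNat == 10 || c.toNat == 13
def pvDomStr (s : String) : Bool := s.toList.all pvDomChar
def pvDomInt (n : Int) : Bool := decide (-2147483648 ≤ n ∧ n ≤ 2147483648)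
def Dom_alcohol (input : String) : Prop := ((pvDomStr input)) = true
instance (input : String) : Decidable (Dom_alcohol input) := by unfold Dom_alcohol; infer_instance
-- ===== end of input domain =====

-- B replaces A's single accumulating loop by per-character counts (str.count / a digit table)
-- plus one validity scan; objective: idiomatic, not faster.

-- ===== PORT A =====
-- the loop body of A; `i.isdigit()` on a Dom character is exactly PySem.Chars.isdigit,
-- and `int(i)` for such a digit character is i.toNat - 48 (exact on ASCII digits)
def alcoholStep (st : Int × Int × Int × Int) (i : Char) : Int × Int × Int × Int :=
  if i = 'C' ∨ i = 'c' then (st.1 + 1, st.2.1, st.2.2.1, st.2.2.2)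
  else if i = 'H' ∨ i = 'h' then (st.1, st.2.1 + 1, st.2.2.1, st.2.2.2)
  else if i = 'O' ∨ i = 'o' then (st.1, st.2.1, st.2.2.1 + 1, st.2.2.2)
  else if PySem.Chars.isdigit i then
    (st.1, st.2.1 + (((i.toNat : Int) - 48) - 1), st.2.2.1, st.2.2.2)
  else (st.1, st.2.1, st.2.2.1, 1)

def alcohol (input : String) : String :=
  let st := input.toList.foldl alcoholStep (0, 0, 0, 0)
  if st.2.2.2 ≠ 1 ∧ st.2.1 = st.1 * 2 + 2 ∧ st.2.2.1 = 1 then "0" else "1"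

-- ===== PORT B =====
-- valid = set("CcHhOo0123456789")
def alcoholValid : PySem.Set Char :=
  PySem.Set.ofList ['C','c','H','h','O','o','0','1','2','3','4','5','6','7','8','9']

def alcoholDigits : List Char := ['0','1','2','3','4','5','6','7','8','9']

-- input.count(d) for a one-character string d is the character count (exact)
def alcohol_alt (input : String) : String :=
  let l := input.toList
  if l.any (fun ch => !(PySem.Set.contains alcoholValid ch)) then "1"
  else
    let carbon : Int := (l.count 'C' : Int) + (l.count 'c' : Int)
    let oxygen : Int := (l.count 'O' : Int) + (l.count 'o' : Int)
    let hydrogen : Int := (l.count 'H' : Int) + (l.count 'h' : Int) +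
      (alcoholDigits.map (fun d => (((d.toNat : Int) - 48) - 1) * (l.count d : Int))).sum
    if hydrogen = carbon * 2 + 2 ∧ oxygen = 1 then "0" else "1"

-- ===== PRECONDITION & SPEC =====
def Spec_alcohol (input : String) (out : String) : Prop := out = alcohol_alt input
instance (input : String) (out : String) : Decidable (Spec_alcohol input out) := by unfold Spec_alcohol; infer_instance

-- ===== CLAIM (what is proved, stated in full; the proofs are below) =====
def Claim_equal_alcohol : Prop := ∀ (input : String), Dom_alcohol input → Spec_alcohol input (alcohol input)

-- ===== LEMMAS AND PROOFS =====

lemma isdigit_iff_mem (x : Char) :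
    PySem.Chars.isdigit x = true ↔ x ∈ alcoholDigits := by
  constructor
  · intro h
    simp only [PySem.Chars.isdigit, Bool.and_eq_true, decide_eq_true_eq, Char.le_def] at h
    have h1 : 48 ≤ x.toNat := h.1
    have h2 : x.toNat ≤ 57 := h.2
    interval_cases hx : x.toNat <;>
      simp_all [alcoholDigits, Char.ext_iff, UInt32.ext_iff]
  · intro h; fin_cases h <;> decide

def digitSum (l : List Char) : Int :=
  (alcoholDigits.map (fun d => (((d.toNat : Int) - 48) - 1) * (l.count d : Int))).sum

lemma digitSum_cons_not_mem (x : Char) (l : List Char) (h : x ∉ alcoholDigits) :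
    digitSum (x :: l) = digitSum l := by
  unfold digitSum
  congr 1
  refine List.map_congr_left ?_
  intro d hd
  rw [List.count_cons_of_ne (by rintro rfl; exact h hd)]

lemma digitSum_cons_mem (x : Char) (l : List Char) (h : x ∈ alcoholDigits) :
    digitSum (x :: l) = digitSum l + (((x.toNat : Int) - 48) - 1) := by
  fin_cases h <;> (unfold digitSum alcoholDigits; simp [List.count_cons]) <;> ring

lemma contains_valid_iff (x : Char) :
    PySem.Set.contains alcoholValid x = true ↔
      (x = 'C' ∨ x = 'c') ∨ (x = 'H' ∨ x = 'h') ∨ (x = 'O' ∨ x = 'o') ∨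
        PySem.Chars.isdigit x = true := by
  rw [isdigit_iff_mem]
  constructor
  · intro h
    have hm : x ∈ (alcoholValid : List Char) := by
      simpa [PySem.Set.contains] using h
    revert hm
    simp [alcoholValid, alcoholDigits, PySem.Set.ofList, PySem.Set.add]
    tauto
  · intro h
    have hm : x ∈ (alcoholValid : List Char) := by
      simp [alcoholValid, alcoholDigits, PySem.Set.ofList, PySem.Set.add] at *
      tauto
    simpa [PySem.Set.contains] using hm

-- A's loop, characterised by per-character counts (B's quantities)
lemma foldl_alcoholStep (l : List Char) (c h o a : Int) :
    l.foldl alcoholStep (c, h, o, a) =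
      (c + (l.count 'C' : Int) + (l.count 'c' : Int),
       h + (l.count 'H' : Int) + (l.count 'h' : Int) + digitSum l,
       o + (l.count 'O' : Int) + (l.count 'o' : Int),
       if l.any (fun ch => !(PySem.Set.contains alcoholValid ch)) then 1 else a) := by
  induction l generalizing c h o a with
  | nil => simp [digitSum, alcoholDigits]
  | cons x l ih =>
    rw [List.foldl_cons]
    by_cases h1 : x = 'C' ∨ x = 'c'
    · rcases h1 with rfl | rfl
      · rw [show alcoholStep (c, h, o, a) 'C' = (c + 1, h, o, a) from rfl, ih,
          digitSum_cons_not_mem 'C' l (by decide)]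
        simp [show ('C' : Char) ∈ alcoholValid from by decide]
        try omega
      · rw [show alcoholStep (c, h, o, a) 'c' = (c + 1, h, o, a) from rfl, ih,
          digitSum_cons_not_mem 'c' l (by decide)]
        simp [show ('c' : Char) ∈ alcoholValid from by decide]
        try omega
    · by_cases h2 : x = 'H' ∨ x = 'h'
      · rcases h2 with rfl | rfl
        · rw [show alcoholStep (c, h, o, a) 'H' = (c, h + 1, o, a) from rfl, ih,
            digitSum_cons_not_mem 'H' l (by decide)]
          simp [show ('H' : Char) ∈ alcoholValid from by decide]
          try omega
        · rw [show alcoholStep (c, h, o, a) 'h' = (c, h + 1, o, a) from rfl, ih,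
            digitSum_cons_not_mem 'h' l (by decide)]
          simp [show ('h' : Char) ∈ alcoholValid from by decide]
          try omega
      · by_cases h3 : x = 'O' ∨ x = 'o'
        · rcases h3 with rfl | rfl
          · rw [show alcoholStep (c, h, o, a) 'O' = (c, h, o + 1, a) from rfl, ih,
              digitSum_cons_not_mem 'O' l (by decide)]
            simp [show ('O' : Char) ∈ alcoholValid from by decide]
            try omega
          · rw [show alcoholStep (c, h, o, a) 'o' = (c, h, o + 1, a) from rfl, ih,
              digitSum_cons_not_mem 'o' l (by decide)]
            simp [show ('o' : Char) ∈ alcoholValid from by decide]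
            try omega
        · by_cases h4 : PySem.Chars.isdigit x = true
          · have hm := (isdigit_iff_mem x).mp h4
            fin_cases hm
            · rw [show alcoholStep (c, h, o, a) '0' =
                  (c, h + ((('0'.toNat : Int) - 48) - 1), o, a) from rfl, ih,
                  digitSum_cons_mem '0' l (by decide)]
              simp [show ('0' : Char) ∈ alcoholValid from by decide]
              try omega
            · rw [show alcoholStep (c, h, o, a) '1' =
                  (c, h + ((('1'.toNat : Int) - 48) - 1), o, a) from rfl, ih,
                  digitSum_cons_mem '1' l (by decide)]
              simp [show ('1' : Char) ∈ alcoholValid from by decide]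
              try omega
            · rw [show alcoholStep (c, h, o, a) '2' =
                  (c, h + ((('2'.toNat : Int) - 48) - 1), o, a) from rfl, ih,
                  digitSum_cons_mem '2' l (by decide)]
              simp [show ('2' : Char) ∈ alcoholValid from by decide]
              try omega
            · rw [show alcoholStep (c, h, o, a) '3' =
                  (c, h + ((('3'.toNat : Int) - 48) - 1), o, a) from rfl, ih,
                  digitSum_cons_mem '3' l (by decide)]
              simp [show ('3' : Char) ∈ alcoholValid from by decide]
              try omega
            · rw [show alcoholStep (c, h, o, a) '4' =
                  (c, h + ((('4'.toNat : Int) - 48) - 1), o, a) from rfl, ih,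
                  digitSum_cons_mem '4' l (by decide)]
              simp [show ('4' : Char) ∈ alcoholValid from by decide]
              try omega
            · rw [show alcoholStep (c, h, o, a) '5' =
                  (c, h + ((('5'.toNat : Int) - 48) - 1), o, a) from rfl, ih,
                  digitSum_cons_mem '5' l (by decide)]
              simp [show ('5' : Char) ∈ alcoholValid from by decide]
              try omega
            · rw [show alcoholStep (c, h, o, a) '6' =
                  (c, h + ((('6'.toNat : Int) - 48) - 1), o, a) from rfl, ih,
                  digitSum_cons_mem '6' l (by decide)]
              simp [show ('6' : Char) ∈ alcoholValid from by decide]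
              try omega
            · rw [show alcoholStep (c, h, o, a) '7' =
                  (c, h + ((('7'.toNat : Int) - 48) - 1), o, a) from rfl, ih,
                  digitSum_cons_mem '7' l (by decide)]
              simp [show ('7' : Char) ∈ alcoholValid from by decide]
              try omega
            · rw [show alcoholStep (c, h, o, a) '8' =
                  (c, h + ((('8'.toNat : Int) - 48) - 1), o, a) from rfl, ih,
                  digitSum_cons_mem '8' l (by decide)]
              simp [show ('8' : Char) ∈ alcoholValid from by decide]
              try omega
            · rw [show alcoholStep (c, h, o, a) '9' =
                  (c, h + ((('9'.toNat : Int) - 48) - 1), o, a) from rfl, ih,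
                  digitSum_cons_mem '9' l (by decide)]
              simp [show ('9' : Char) ∈ alcoholValid from by decide]
              try omega
          · rw [alcoholStep, if_neg h1, if_neg h2, if_neg h3, if_neg h4, ih,
              digitSum_cons_not_mem x l
                (fun hm => h4 ((isdigit_iff_mem x).mpr hm))]
            have hC : ('C' : Char) ≠ x := fun e => h1 (Or.inl e.symm)
            have hc : ('c' : Char) ≠ x := fun e => h1 (Or.inr e.symm)
            have hH : ('H' : Char) ≠ x := fun e => h2 (Or.inl e.symm)
            have hh : ('h' : Char) ≠ x := fun e => h2 (Or.inr e.symm)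
            have hO : ('O' : Char) ≠ x := fun e => h3 (Or.inl e.symm)
            have ho : ('o' : Char) ≠ x := fun e => h3 (Or.inr e.symm)
            have hval : ¬ (x ∈ (alcoholValid : List Char)) := by
              intro hmem
              have ht : PySem.Set.contains alcoholValid x = true := by
                simpa [PySem.Set.contains] using hmem
              rcases (contains_valid_iff x).mp ht with hl | hl | hl | hl
              · exact h1 hl
              · exact h2 hl
              · exact h3 hl
              · exact h4 hl
            simp [hval]
            exact ⟨by rw [List.count_cons_of_ne (Ne.symm hC), List.count_cons_of_ne (Ne.symm hc)],
              by rw [List.count_cons_of_ne (Ne.symm hH), List.count_cons_of_ne (Ne.symm hh)],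
              by rw [List.count_cons_of_ne (Ne.symm hO), List.count_cons_of_ne (Ne.symm ho)]⟩

-- ===== VERDICT (by name: the statement is the Claim_ definition above) =====
theorem alcohol_spec : Claim_equal_alcohol := by
  unfold Claim_equal_alcohol
  intro input _
  unfold Spec_alcohol alcohol alcohol_alt
  rw [foldl_alcoholStep]
  by_cases hinv : (input.toList.any fun ch => !(PySem.Set.contains alcoholValid ch)) = true
  · simp only [hinv, if_true]
    simp
  · simp only [Bool.not_eq_true] at hinv
    simp only [hinv, Bool.false_eq_true, if_false]
    simp [digitSum]
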